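-- pv_equiv track=rewrite | github.com/hi-hj/algorithm-study | 프로그래머스/l1_신규 아이디 추천.py | solution
-- ===== SOURCE A (Python) =====
-- def solution(new_id):
--     ID = list(new_id)
--
--     # Step 1
--     for idx, char in enumerate(ID):
--         if char.isalpha():
--             ID[idx] = char.lower()
--     # Step 2
--     s2 = []
--     for char in ID:
--         if char.isalpha() or char.isdigit() or char in ('-','_','.'):
--             s2.append(char)
--     # Step 3
--     s3 = []
--     for char in s2:
--         if s3 and char =='.' and s3[-1]=='.':
--             continue
--         else:
--             s3.append(char)
--
--     # Step 4
--     if s3[0] == '.':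
--         s3 = s3[1:]
--     if s3 and s3[-1] == '.':
--         s3 = s3[:-1]
--
--     # Step 5
--     if not s3:
--         s3.append('a')
--
--     # Step 6
--     s3 = s3[:15]
--     if s3[-1] =='.':
--         s3 = s3[:-1]
--
--     # Step 7
--     while len(s3)<=2:
--         s3.append(s3[-1])
--
--
--     return ''.join(s3)
-- ===== SOURCE B (Python) =====
-- def solution(new_id):
--     s = ''.join(c for c in new_id.lower() if c.isalnum() or c in '-_.')
--     s = '.'.join(p for p in s.split('.') if p) or 'a'
--     s = s[:15]
--     if s.endswith('.'):
--         s = s[:-1]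
--     return s + s[-1] * (3 - len(s))
-- ===== Notes on version B (the rewrite author's own statement) =====
-- stated objective: simpler
-- what changed: Steps 1-3 become a declarative pipeline (lower the whole string once, one filter comprehension, then a split/join of non-empty parts that collapses dot runs and strips edge dots in one stroke, replacing A's three index-twiddling loops plus two conditional strips) and the Step-7 while loop becomes a closed-form pad; the C-implemented str methods also make B measurably faster by a constant factor.
-- outside the precondition, e.g. on solution('!!'): A raises IndexError, B returns 'aaa'
import Mathlib
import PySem

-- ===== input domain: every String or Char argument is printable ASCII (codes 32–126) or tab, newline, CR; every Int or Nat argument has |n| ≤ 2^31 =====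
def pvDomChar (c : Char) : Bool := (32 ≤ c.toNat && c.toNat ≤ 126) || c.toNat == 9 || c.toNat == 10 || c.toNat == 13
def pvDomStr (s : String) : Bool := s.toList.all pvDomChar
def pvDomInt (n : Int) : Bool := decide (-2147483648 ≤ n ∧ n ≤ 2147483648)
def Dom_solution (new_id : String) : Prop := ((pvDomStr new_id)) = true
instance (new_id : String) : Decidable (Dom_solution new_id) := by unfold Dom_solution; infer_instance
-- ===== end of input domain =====

-- B rebuilds Steps 1–3 declaratively (lower the whole string + one filter, then split('.')/join to collapse and
-- strip dots in one stroke) and replaces the Step-7 while loop by a closed-form pad; objective: simpler/idiomatic.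

-- ===== PORT A =====
-- Steps 1–2: lowercase the alphabetic characters in place, then filter the allowed ones
def solA_s2 (l : List Char) : List Char :=
  (l.map (fun c => if PySem.Chars.isalpha c then PySem.Chars.lowerChar c else c)).foldl
    (fun acc c =>
      if PySem.Chars.isalpha c || PySem.Chars.isdigit c || (['-', '_', '.'] : List Char).contains c
      then acc ++ [c] else acc) []

-- Step 3: skip a '.' when the last appended char is already '.'
def solA_s3 (s2 : List Char) : List Char :=
  s2.foldl (fun acc c =>
    if acc ≠ [] ∧ c = '.' ∧ PySem.List.pyGetD acc (-1) ' ' = '.' then acc else acc ++ [c]) []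

-- Step 7: while len(s3) <= 2: s3.append(s3[-1])
def pyPad (s3 : List Char) : List Char :=
  if s3.length ≤ 2 then pyPad (s3 ++ [PySem.List.pyGetD s3 (-1) 'a']) else s3
termination_by 3 - s3.length
decreasing_by simp; omega

-- Steps 5–7
def solA_step5 (s4 : List Char) : String :=
  let s5 := if s4 = [] then s4 ++ ['a'] else s4
  let s6a := PySem.List.slice s5 none (some 15)
  let s6 := if PySem.List.pyGetD s6a (-1) ' ' = '.' then PySem.List.slice s6a none (some (-1)) else s6a
  String.ofList (pyPad s6)

-- Step 4: Python indexes s3[0] first; on empty s3 it raises IndexError (excluded by Pre_solution)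
def solA_step4 (s3 : List Char) : String :=
  match PySem.List.pyGet? s3 0 with
  | none => ""
  | some c0 =>
    let s4a := if c0 = '.' then PySem.List.slice s3 (some 1) none else s3
    let s4 := if s4a ≠ [] ∧ PySem.List.pyGetD s4a (-1) ' ' = '.'
              then PySem.List.slice s4a none (some (-1)) else s4a
    solA_step5 s4

def solution (new_id : String) : String :=
  solA_step4 (solA_s3 (solA_s2 new_id.toList))

-- ===== PORT B =====
-- s = ''.join(c for c in new_id.lower() if c.isalnum() or c in '-_.')
def solB_clean (new_id : String) : List Char :=
  (PySem.Str.lower new_id).toList.filter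
    (fun c => PySem.Chars.isalnum c || (['-', '_', '.'] : List Char).contains c)

-- s = '.'.join(p for p in s.split('.') if p)
def solB_collapse (s1 : List Char) : List Char :=
  PySem.Chars.join ['.'] ((PySem.Chars.splitOn s1 ['.']).filter (fun p => p ≠ []))

-- the 'or 'a'', truncation, trailing-dot drop and closed-form pad
def solB_fill (s2 : List Char) : String :=
  let s3 := if s2 = [] then ['a'] else s2
  let s4 := PySem.List.slice s3 none (some 15)
  let s5 := if PySem.Chars.endswith s4 ['.'] then PySem.List.slice s4 none (some (-1)) else s4
  String.ofList (s5 ++ List.replicate (3 - s5.length) (PySem.List.pyGetD s5 (-1) 'a'))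

def solution_alt (new_id : String) : String :=
  solB_fill (solB_collapse (solB_clean new_id))

-- ===== PRECONDITION & SPEC =====
-- Pre_ excludes exactly the inputs that contain no kept character at all (nothing alphanumeric and none of the
-- three allowed punctuation marks), on which A raises IndexError at Step 4 (s3[0] is read before any emptiness check).
def Pre_solution (new_id : String) : Prop :=
  new_id.toList.any (fun c => PySem.Chars.isalnum c || (['-', '_', '.'] : List Char).contains c) = true
instance (new_id : String) : Decidable (Pre_solution new_id) := by unfold Pre_solution; infer_instance

def pvWitness_solution : String := "abc"

def Spec_solution (new_id : String) (out : String) : Prop := out = solution_alt new_id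
instance (new_id : String) (out : String) : Decidable (Spec_solution new_id out) := by unfold Spec_solution; infer_instance

-- ===== CLAIM (what is proved, stated in full; the proofs are below) =====
def Claim_equal_solution : Prop := ∀ (new_id : String), Dom_solution new_id → Pre_solution new_id → Spec_solution new_id (solution new_id)

-- ===== LEMMAS AND PROOFS =====

-- what Steps 1–2 keep (in A: lowercase alphas, then filter; in B: lower everything, then filter)
def pvKeep (c : Char) : Bool := PySem.Chars.isalnum c || (['-', '_', '.'] : List Char).contains c

-- the Step-3 dot-collapse, recast as front recursion; the Bool says "the last emitted char was '.'"
def colD : Bool → List Char → List Char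
  | _, [] => []
  | b, c :: cs => if c = '.' then (if b then colD true cs else '.' :: colD true cs) else c :: colD false cs

-- Python's s.split('.') as plain structural recursion
def spD : List Char → List (List Char)
  | [] => [[]]
  | c :: cs => if c = '.' then [] :: spD cs else (spD cs).modifyHead (c :: ·)

def joinNE (ps : List (List Char)) : List Char := List.intercalate ['.'] (ps.filter (· ≠ []))

def stripT (z : List Char) : List Char := if z.getLast? = some '.' then z.dropLast else z

lemma char_toNat_ofNat (n : Nat) (h : n < 55296) : (Char.ofNat n).toNat = n := by
  unfold Char.ofNat
  split
  · rfl
  · exact absurd (Or.inl h) (by assumption)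

lemma char_le_iff (c d : Char) : (c ≤ d) ↔ c.toNat ≤ d.toNat := Char.le_def

lemma lowerChar_of_not_alpha (c : Char) (h : PySem.Chars.isalpha c = false) :
    PySem.Chars.lowerChar c = c := by
  unfold PySem.Chars.lowerChar
  unfold PySem.Chars.isalpha at h
  simp only [Bool.or_eq_false_iff] at h
  simp [h.1]

lemma keep_lowerChar (c : Char) : pvKeep (PySem.Chars.lowerChar c) = pvKeep c := by
  by_cases hu : PySem.Chars.isupper c = true
  · have hc : 65 ≤ c.toNat ∧ c.toNat ≤ 90 := by
      simpa [PySem.Chars.isupper, char_le_iff] using hu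
    have hd : (Char.ofNat (c.toNat + 32)).toNat = c.toNat + 32 := char_toNat_ofNat _ (by omega)
    have hl : PySem.Chars.islower (PySem.Chars.lowerChar c) = true := by
      simp only [PySem.Chars.islower, PySem.Chars.lowerChar, hu, if_true, char_le_iff,
        Bool.and_eq_true, decide_eq_true_eq]
      rw [hd]
      have h1 : Char.toNat 'a' = 97 := rfl
      have h2 : Char.toNat 'z' = 122 := rfl
      omega
    have l1 : pvKeep (PySem.Chars.lowerChar c) = true := by
      simp [pvKeep, PySem.Chars.isalnum, PySem.Chars.isalpha, hl]
    have r1 : pvKeep c = true := by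
      simp [pvKeep, PySem.Chars.isalnum, PySem.Chars.isalpha, hu]
    rw [l1, r1]
  · simp [PySem.Chars.lowerChar, hu]

-- Stage 1–2: A's map-then-filter-fold is "lower everything, keep pvKeep"
lemma stageA_eq (l : List Char) : solA_s2 l = (PySem.Chars.lower l).filter pvKeep := by
  unfold solA_s2
  rw [PySem.List.foldl_append_if
    (p := fun c => PySem.Chars.isalpha c || PySem.Chars.isdigit c || (['-', '_', '.'] : List Char).contains c)
    (f := fun c => c)]
  simp only [List.map_id_fun', id, List.nil_append]
  have hm : l.map (fun c => if PySem.Chars.isalpha c then PySem.Chars.lowerChar c else c)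
      = PySem.Chars.lower l := by
    unfold PySem.Chars.lower
    apply List.map_congr_left
    intro c _
    by_cases h : PySem.Chars.isalpha c = true
    · simp [h]
    · simp [h, lowerChar_of_not_alpha c (by simpa using h)]
  rw [hm]
  apply List.filter_congr
  intro c _
  simp [pvKeep, PySem.Chars.isalnum, Bool.or_assoc]

-- Step 3's foldl is colD
lemma foldl_colD (xs : List Char) (acc : List Char) :
    xs.foldl (fun acc c => if acc ≠ [] ∧ c = '.' ∧ PySem.List.pyGetD acc (-1) ' ' = '.' then acc else acc ++ [c]) acc
    = acc ++ colD (decide (acc.getLast? = some '.')) xs := by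
  induction xs generalizing acc with
  | nil => simp [colD]
  | cons c cs ih =>
    rw [List.foldl_cons, ih]
    by_cases hne : acc = []
    · subst hne
      simp only [ne_eq, not_true_eq_false, false_and, if_false, List.nil_append]
      by_cases hc : c = '.'
      · subst hc; simp [colD, List.getLast?_append]
      · simp [colD, hc]
    · by_cases hc : c = '.'
      · subst hc
        by_cases hl : acc.getLast? = some '.'
        · have hg : PySem.List.pyGetD acc (-1) ' ' = '.' := by
            rw [PySem.List.pyGetD_neg_one acc ' ' hne]
            rwa [List.getLast?_eq_some_getLast hne, Option.some_inj] at hl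
          simp [hne, hg, hl, colD]
        · have hg : ¬ (PySem.List.pyGetD acc (-1) ' ' = '.') := by
            rw [PySem.List.pyGetD_neg_one acc ' ' hne]
            intro h; apply hl
            rw [List.getLast?_eq_some_getLast hne, h]
          simp only [ne_eq, hne, not_false_iff, hg, and_false, if_false]
          simp [hl, colD, List.getLast?_append]
      · simp [hc, colD, List.getLast?_append]

lemma colD_false_ne_nil (xs : List Char) (h : xs ≠ []) : colD false xs ≠ [] := by
  cases xs with
  | nil => exact absurd rfl h
  | cons c cs => by_cases hc : c = '.' <;> simp [colD, hc]

lemma headStrip_colD_false (xs : List Char) :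
    (if (colD false xs).head? = some '.' then (colD false xs).tail else colD false xs) = colD true xs := by
  cases xs with
  | nil => simp [colD]
  | cons c cs =>
    by_cases hc : c = '.'
    · subst hc; simp [colD]
    · simp [colD, hc]

lemma pvInter_cons_cons (q r : List Char) (u : List (List Char)) :
    List.intercalate ['.'] (q :: r :: u) = q ++ ['.'] ++ List.intercalate ['.'] (r :: u) := by
  simp [List.intercalate, List.intersperse]

lemma pvInter_single (q : List Char) : List.intercalate ['.'] [q] = q := by
  simp [List.intercalate, List.intersperse]

lemma pvInter_nil : List.intercalate ['.'] ([] : List (List Char)) = [] := by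
  simp [List.intercalate]

lemma stripT_append (a y : List Char) (h : y ≠ []) : stripT (a ++ y) = a ++ stripT y := by
  unfold stripT
  rw [List.getLast?_append_of_ne_nil a h]
  split
  · rw [List.dropLast_append_of_ne_nil h]
  · rfl

lemma intercalate_nil_iff (qs : List (List Char)) (h : ∀ q ∈ qs, q ≠ []) :
    List.intercalate ['.'] qs = [] ↔ qs = [] := by
  cases qs with
  | nil => simp [pvInter_nil]
  | cons q t =>
    cases t with
    | nil =>
      rw [pvInter_single]
      simp
      exact h q (by simp)
    | cons r u =>
      rw [pvInter_cons_cons]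
      simp

lemma joinNE_nil : joinNE [] = [] := by
  unfold joinNE; rw [List.filter_nil, pvInter_nil]

lemma joinNE_cons_nil : joinNE ([] :: ps) = joinNE ps := by
  unfold joinNE
  rw [List.filter_cons_of_neg (by simp)]

lemma joinNE_cons_ne (p : List Char) (ps : List (List Char)) (hp : p ≠ []) :
    joinNE (p :: ps) = p ++ (if joinNE ps = [] then [] else '.' :: joinNE ps) := by
  by_cases hnil : joinNE ps = []
  · rw [if_pos hnil]
    unfold joinNE at hnil ⊢
    rw [List.filter_cons_of_pos (by simpa using hp)]
    rw [(intercalate_nil_iff _ (fun q hq => by simpa using List.of_mem_filter hq)).mp hnil]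
    rw [pvInter_single, List.append_nil]
  · rw [if_neg hnil]
    unfold joinNE at hnil ⊢
    rw [List.filter_cons_of_pos (by simpa using hp)]
    obtain ⟨r, u, hru⟩ := List.exists_cons_of_ne_nil
      (show ps.filter (· ≠ []) ≠ [] from fun hh => hnil (by rw [hh, pvInter_nil]))
    rw [hru, pvInter_cons_cons, ← hru]
    simp

lemma colD_true_nil (xs : List Char) : colD true xs = [] ↔ ∀ c ∈ xs, c = '.' := by
  induction xs with
  | nil => simp [colD]
  | cons c cs ih =>
    by_cases hc : c = '.'
    · subst hc; simp [colD, ih]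
    · simp [colD, hc]

lemma spD_ne_nil (xs : List Char) : spD xs ≠ [] := by
  induction xs with
  | nil => simp [spD]
  | cons c cs ih =>
    by_cases hc : c = '.'
    · simp [spD, hc]
    · simp only [spD, hc, if_false]
      cases h : spD cs with
      | nil => exact absurd h ih
      | cons q t => simp [List.modifyHead]

lemma joinNE_spD_nil (xs : List Char) : joinNE (spD xs) = [] ↔ ∀ c ∈ xs, c = '.' := by
  induction xs with
  | nil => simp [spD, joinNE_cons_nil, joinNE_nil]
  | cons c cs ih =>
    by_cases hc : c = '.'
    · subst hc
      simp only [spD, if_true]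
      rw [joinNE_cons_nil]
      simpa using ih
    · simp only [spD, hc, if_false]
      constructor
      · intro h
        exfalso
        cases hsp : spD cs with
        | nil => exact spD_ne_nil cs hsp
        | cons q t =>
          rw [hsp] at h
          simp only [List.modifyHead] at h
          rw [joinNE_cons_ne _ _ (by simp)] at h
          simp at h
      · intro h
        exact absurd (h c (by simp)) hc

lemma stripT_no_dot (p : List Char) (hd : '.' ∉ p) : stripT p = p := by
  unfold stripT
  split
  · rename_i h
    exact absurd (List.mem_of_getLast? h) hd
  · rfl

-- the heart: collapse-then-strip equals split/filter/join
lemma stripT_colD_main (xs : List Char) :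
    stripT (colD true xs) = joinNE (spD xs) ∧
    ∀ p : List Char, p ≠ [] → '.' ∉ p →
      stripT (p ++ colD false xs) = joinNE ((spD xs).modifyHead (p ++ ·)) := by
  induction xs with
  | nil =>
    constructor
    · simp [colD, spD, stripT, joinNE_cons_nil, joinNE_nil]
    · intro p hp hd
      simp only [colD, spD, List.append_nil, List.modifyHead]
      rw [stripT_no_dot p hd, joinNE_cons_ne _ _ (by simpa using hp), joinNE_nil]
      simp
  | cons c cs ih =>
    by_cases hc : c = '.'
    · subst hc
      constructor
      · simpa [colD, spD, joinNE_cons_nil] using ih.1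
      · intro p hp hd
        simp only [colD, spD, if_true, List.modifyHead, List.append_nil,
          Bool.false_eq_true, if_false]
        by_cases h0 : colD true cs = []
        · have hj : joinNE (spD cs) = [] :=
            (joinNE_spD_nil cs).mpr ((colD_true_nil cs).mp h0)
          rw [h0, joinNE_cons_ne _ _ hp, hj, if_pos rfl]
          unfold stripT
          rw [List.getLast?_append_of_ne_nil p (by simp)]
          simp
        · have hj : joinNE (spD cs) ≠ [] := fun hh =>
            h0 ((colD_true_nil cs).mpr ((joinNE_spD_nil cs).mp hh))
          have hsplit : p ++ '.' :: colD true cs = (p ++ ['.']) ++ colD true cs := by simp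
          rw [hsplit, stripT_append _ _ h0, ih.1, joinNE_cons_ne _ _ hp, if_neg hj]
          simp
    · have hone : (fun x => [c] ++ x) = (fun x : List Char => c :: x) := by
        funext x; simp
      constructor
      · show stripT (colD true (c :: cs)) = joinNE (spD (c :: cs))
        have h1 : colD true (c :: cs) = [c] ++ colD false cs := by simp [colD, hc]
        rw [h1, ih.2 [c] (by simp) (by simp; exact fun h => hc h.symm)]
        simp only [spD, hc, if_false]
        rw [hone]
      · intro p hp hd
        simp only [colD, hc, if_false]
        have h1 : p ++ c :: colD false cs = (p ++ [c]) ++ colD false cs := by simp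
        rw [h1, ih.2 (p ++ [c]) (by simp) (by simp [hd]; exact fun h => hc h.symm)]
        simp only [spD, hc, if_false]
        rw [List.modifyHead_modifyHead]
        have hcomp : ((fun x => p ++ x) ∘ fun x => c :: x) = (fun x => (p ++ [c]) ++ x) := by
          funext x; simp
        rw [hcomp]

lemma modifyHead_id (l : List (List Char)) : l.modifyHead (fun x => x) = l := by
  cases l <;> simp [List.modifyHead]

lemma splitOn_go_eq (fuel : Nat) (l cur : List Char) (acc : List (List Char)) (h : l.length < fuel) :
    PySem.Chars.splitOn.go ['.'] fuel l cur acc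
    = acc.reverse ++ (spD l).modifyHead (cur.reverse ++ ·) := by
  induction fuel generalizing l cur acc with
  | zero => omega
  | succ fuel ih =>
    cases l with
    | nil =>
      simp [PySem.Chars.splitOn.go, spD, List.modifyHead]
    | cons c rest =>
      by_cases hc : c = '.'
      · subst hc
        rw [show PySem.Chars.splitOn.go ['.'] (fuel + 1) ('.' :: rest) cur acc
            = PySem.Chars.splitOn.go ['.'] fuel (List.drop 1 ('.' :: rest)) [] (cur.reverse :: acc) from by
          simp [PySem.Chars.splitOn.go, List.isPrefixOf]]
        rw [ih _ _ _ (by simpa using h)]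
        have : ((fun x => (([] : List Char)).reverse ++ x) : List Char → List Char) = fun x => x := by
          funext x; simp
        rw [this, modifyHead_id]
        simp [spD, List.modifyHead]
      · rw [show PySem.Chars.splitOn.go ['.'] (fuel + 1) (c :: rest) cur acc
            = PySem.Chars.splitOn.go ['.'] fuel rest (c :: cur) acc from by
          simp [PySem.Chars.splitOn.go, List.isPrefixOf]
          intro hh
          exact absurd hh.symm hc]
        rw [ih _ _ _ (by simpa using h)]
        simp only [spD, hc, if_false]
        rw [List.modifyHead_modifyHead]
        have : ((fun x => (c :: cur).reverse ++ x) : List Char → List Char)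
            = ((fun x => cur.reverse ++ x) ∘ fun x => c :: x) := by
          funext x; simp
        rw [this]

lemma splitOn_eq_spD (s : List Char) : PySem.Chars.splitOn s ['.'] = spD s := by
  unfold PySem.Chars.splitOn
  rw [splitOn_go_eq _ _ _ _ (by omega)]
  have : ((fun x => (([] : List Char)).reverse ++ x) : List Char → List Char) = fun x => x := by
    funext x; simp
  rw [this, modifyHead_id]
  simp

lemma endswith_guard (z : List Char) :
    (PySem.Chars.endswith z ['.'] = true) ↔ (PySem.List.pyGetD z (-1) ' ' = '.') := by
  cases hz : z.getLast? with
  | none =>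
    rw [List.getLast?_eq_none_iff] at hz
    subst hz
    constructor
    · intro h
      rw [PySem.Chars.endswith_iff] at h
      simp at h
    · intro h
      simp [PySem.List.pyGetD, PySem.List.pyGet?] at h
  | some c =>
    have hne : z ≠ [] := by
      intro h; subst h; simp at hz
    rw [PySem.Chars.endswith_iff, PySem.List.pyGetD_neg_one z ' ' hne]
    constructor
    · rintro ⟨t, ht⟩
      have h2 : z.getLast? = some '.' := by
        rw [← ht, List.getLast?_append_of_ne_nil t (by decide)]
        rfl
      rw [List.getLast?_eq_some_getLast hne, Option.some_inj] at h2
      exact h2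
    · intro h
      refine ⟨z.dropLast, ?_⟩
      conv_rhs => rw [← List.dropLast_concat_getLast hne]
      rw [h]

lemma pyPad_stop (z : List Char) (h : ¬ z.length ≤ 2) : pyPad z = z := by
  rw [pyPad]
  simp [h]

lemma pyPad_step (z : List Char) (h : z.length ≤ 2) :
    pyPad z = pyPad (z ++ [PySem.List.pyGetD z (-1) 'a']) := by
  conv_lhs => rw [pyPad]
  rw [if_pos h]

lemma pyGetD_last_singleton (a : Char) : PySem.List.pyGetD [a] (-1) 'a' = a := by
  rw [PySem.List.pyGetD_neg_one _ _ (by simp)]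
  simp

lemma pyGetD_last_pair (a b : Char) : PySem.List.pyGetD [a, b] (-1) 'a' = b := by
  rw [PySem.List.pyGetD_neg_one _ _ (by simp)]
  simp

lemma pyPad_eq (z : List Char) :
    pyPad z = z ++ List.replicate (3 - z.length) (PySem.List.pyGetD z (-1) 'a') := by
  match z with
  | [] =>
    have h0 : PySem.List.pyGetD ([] : List Char) (-1) 'a' = 'a' := by decide
    rw [pyPad_step _ (by simp), h0]
    rw [pyPad_step _ (by simp), PySem.List.pyGetD_neg_one_append_singleton]
    rw [pyPad_step _ (by simp), PySem.List.pyGetD_neg_one_append_singleton]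
    rw [pyPad_stop _ (by simp)]
    simp [List.replicate]
  | [a] =>
    rw [pyPad_step _ (by simp), pyGetD_last_singleton]
    rw [pyPad_step _ (by simp), PySem.List.pyGetD_neg_one_append_singleton]
    rw [pyPad_stop _ (by simp)]
    simp [List.replicate]
  | [a, b] =>
    rw [pyPad_step _ (by simp), pyGetD_last_pair]
    rw [pyPad_stop _ (by simp)]
    simp
  | a :: b :: c :: t =>
    rw [pyPad_stop _ (by simp)]
    have : 3 - (a :: b :: c :: t).length = 0 := by simp
    rw [this]
    simp

lemma pre_iff_filter_ne (new_id : String) :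
    Pre_solution new_id ↔ (PySem.Chars.lower new_id.toList).filter pvKeep ≠ [] := by
  unfold Pre_solution PySem.Chars.lower
  rw [List.any_eq_true]
  constructor
  · rintro ⟨c, hc, hk⟩
    intro hnil
    have hm : PySem.Chars.lowerChar c ∈ (new_id.toList.map PySem.Chars.lowerChar).filter pvKeep := by
      refine List.mem_filter.mpr ⟨List.mem_map_of_mem hc, ?_⟩
      rw [keep_lowerChar]
      exact hk
    rw [hnil] at hm
    simp at hm
  · intro h
    obtain ⟨d, hd⟩ := List.exists_mem_of_ne_nil _ h
    obtain ⟨hdm, hdk⟩ := List.mem_filter.mp hd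
    obtain ⟨c, hc, hlc⟩ := List.mem_map.mp hdm
    refine ⟨c, hc, ?_⟩
    show pvKeep c = true
    rw [← keep_lowerChar, hlc]
    exact hdk

lemma stripT_guard (z : List Char) :
    (z ≠ [] ∧ PySem.List.pyGetD z (-1) ' ' = '.') ↔ z.getLast? = some '.' := by
  constructor
  · rintro ⟨hne, hg⟩
    rw [PySem.List.pyGetD_neg_one z ' ' hne] at hg
    rw [List.getLast?_eq_some_getLast hne, Option.some_inj]
    exact hg
  · intro h
    have hne : z ≠ [] := by
      intro e; subst e; simp at h
    refine ⟨hne, ?_⟩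
    rw [PySem.List.pyGetD_neg_one z ' ' hne]
    rw [List.getLast?_eq_some_getLast hne, Option.some_inj] at h
    exact h

lemma guard_strip (z : List Char) :
    (if z ≠ [] ∧ PySem.List.pyGetD z (-1) ' ' = '.' then z.dropLast else z) = stripT z := by
  unfold stripT
  by_cases h : z.getLast? = some '.'
  · rw [if_pos ((stripT_guard z).mpr h), if_pos h]
  · rw [if_neg (fun hh => h ((stripT_guard z).mp hh)), if_neg h]

lemma step4_cons (d : Char) (t : List Char) :
    solA_step4 (d :: t) = solA_step5 (stripT (if d = '.' then t else d :: t)) := by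
  unfold solA_step4
  rw [PySem.List.pyGet?_zero_cons]
  simp only [PySem.List.slice_from_one, PySem.List.slice_to_neg_one, List.tail_cons]
  rw [guard_strip]

lemma step4_eq (xs : List Char) (hxs : xs ≠ []) :
    solA_step4 (colD false xs) = solA_step5 (stripT (colD true xs)) := by
  cases hz : colD false xs with
  | nil => exact absurd hz (colD_false_ne_nil xs hxs)
  | cons d t =>
    rw [step4_cons]
    congr 2
    have hh := headStrip_colD_false xs
    rw [hz] at hh
    simp only [List.head?_cons, List.tail_cons] at hh
    rw [← hh]
    by_cases hd : d = '.' <;> simp [hd]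

lemma tails_eq (m : List Char) : solA_step5 m = solB_fill m := by
  simp only [solA_step5, solB_fill]
  have hfill : (if m = [] then m ++ ['a'] else m) = (if m = [] then ['a'] else m) := by
    by_cases hm : m = [] <;> simp [hm]
  rw [hfill]
  by_cases hg : PySem.List.pyGetD (PySem.List.slice (if m = [] then ['a'] else m) none (some 15)) (-1) ' ' = '.'
  · rw [if_pos hg, if_pos ((endswith_guard _).mpr hg), pyPad_eq]
  · rw [if_neg hg, if_neg (fun hh => hg ((endswith_guard _).mp hh)), pyPad_eq]

lemma s3_colD (xs : List Char) : solA_s3 xs = colD false xs := by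
  unfold solA_s3
  rw [foldl_colD]
  simp

lemma clean_eq (new_id : String) :
    solB_clean new_id = (PySem.Chars.lower new_id.toList).filter pvKeep := by
  unfold solB_clean
  have h1 : (PySem.Str.lower new_id).toList = PySem.Chars.lower new_id.toList := by
    simp [PySem.Str.lower]
  rw [h1]
  apply List.filter_congr
  intro c _
  simp [pvKeep]

lemma pvCollapse_eq (xs : List Char) : solB_collapse xs = joinNE (spD xs) := by
  unfold solB_collapse joinNE PySem.Chars.join
  rw [splitOn_eq_spD]

-- ===== VERDICT (by name: the statement is the Claim_ definition above) =====
theorem solution_spec : Claim_equal_solution := by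
  intro new_id _hdom hpre
  unfold Spec_solution solution solution_alt
  rw [stageA_eq, s3_colD, clean_eq, pvCollapse_eq]
  have hxs := (pre_iff_filter_ne new_id).mp hpre
  rw [step4_eq _ hxs, (stripT_colD_main _).1, tails_eq]
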